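-- pv_equiv track=rewrite | github.com/stallam101/NVSim | sierpinski_test.py | analyze_transition
-- ===== SOURCE A (Python) =====
-- from typing import Dict, Optional, Tuple, List
--
-- def analyze_transition(cw0: int, cw1: int) -> Dict[str, int]:
--     """
--     Analyze the bit transitions between two codewords.
--
--     Args:
--         cw0: Source codeword
--         cw1: Target codeword
--
--     Returns:
--         Dictionary with transition counts
--     """
--
--     diff = cw0 ^ cw1
--
--
--     set_transitions = 0
--     reset_transitions = 0
--     redundant_ops = 0
--
--     for i in range(21):
--         bit_mask = 1 << i
--         cw0_bit = (cw0 & bit_mask) >> i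
--         cw1_bit = (cw1 & bit_mask) >> i
--
--         if cw0_bit == 0 and cw1_bit == 1:
--             set_transitions += 1
--         elif cw0_bit == 1 and cw1_bit == 0:
--             reset_transitions += 1
--         else:
--             redundant_ops += 1
--
--     return {
--         'set_transitions': set_transitions,
--         'reset_transitions': reset_transitions,
--         'redundant_ops': redundant_ops,
--         'total_bits': 21
--     }
-- ===== SOURCE B (Python) =====
-- def analyze_transition(cw0: int, cw1: int):
--     mask = (1 << 21) - 1
--     set_transitions = (~cw0 & cw1 & mask).bit_count()
--     reset_transitions = (cw0 & ~cw1 & mask).bit_count()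
--     return {
--         'set_transitions': set_transitions,
--         'reset_transitions': reset_transitions,
--         'redundant_ops': 21 - set_transitions - reset_transitions,
--         'total_bits': 21
--     }
-- ===== Notes on version B (the rewrite author's own statement) =====
-- stated objective: simpler
-- what changed: Replaces the explicit 21-iteration per-bit classification loop with a bit-parallel closed form: popcounts of (~cw0 & cw1) & mask and (cw0 & ~cw1) & mask give the set/reset counts and redundant_ops is 21 minus both.
import Mathlib
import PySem

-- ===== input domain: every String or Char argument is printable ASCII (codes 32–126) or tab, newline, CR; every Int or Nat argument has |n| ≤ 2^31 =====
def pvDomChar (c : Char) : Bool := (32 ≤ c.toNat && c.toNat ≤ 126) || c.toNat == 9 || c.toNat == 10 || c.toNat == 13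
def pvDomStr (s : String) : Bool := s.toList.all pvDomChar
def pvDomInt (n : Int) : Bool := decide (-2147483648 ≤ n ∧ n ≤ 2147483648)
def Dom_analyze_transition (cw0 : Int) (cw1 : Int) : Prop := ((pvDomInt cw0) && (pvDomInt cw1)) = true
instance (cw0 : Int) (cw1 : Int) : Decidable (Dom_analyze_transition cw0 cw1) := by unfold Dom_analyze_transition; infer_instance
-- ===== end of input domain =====

-- B replaces A's 21-iteration per-bit classification loop by a bit-parallel closed form
-- (two masked popcounts; redundant ops by subtraction) — objective: simpler.

-- ===== PORT A =====
-- loop body of A's `for i in range(21)`; shift amounts are i.toNat (exact: the loop only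
-- produces i = 0..20, all nonnegative)
def pvStep (cw0 : Int) (cw1 : Int) (st : Int × Int × Int) (i : Int) : Int × Int × Int :=
  let bit_mask : Int := 1 <<< i.toNat
  let cw0_bit : Int := (PySem.Int.band cw0 bit_mask) >>> i.toNat
  let cw1_bit : Int := (PySem.Int.band cw1 bit_mask) >>> i.toNat
  if cw0_bit = 0 ∧ cw1_bit = 1 then (st.1 + 1, st.2.1, st.2.2)
  else if cw0_bit = 1 ∧ cw1_bit = 0 then (st.1, st.2.1 + 1, st.2.2)
  else (st.1, st.2.1, st.2.2 + 1)

def analyze_transition (cw0 : Int) (cw1 : Int) : List (String × Int) :=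
  let _diff : Int := PySem.Int.bxor cw0 cw1   -- A computes `diff` and never uses it
  let st := (PySem.List.pyRange 0 21 1).foldl (pvStep cw0 cw1) (0, 0, 0)
  [("set_transitions", st.1), ("reset_transitions", st.2.1),
   ("redundant_ops", st.2.2), ("total_bits", 21)]

-- ===== PORT B =====
def analyze_transition_alt (cw0 : Int) (cw1 : Int) : List (String × Int) :=
  let mask : Int := ((1 : Int) <<< (21 : Nat)) - 1
  let set_transitions : Int := PySem.Int.bitCount (PySem.Int.band (PySem.Int.band (Int.not cw0) cw1) mask)
  let reset_transitions : Int := PySem.Int.bitCount (PySem.Int.band (PySem.Int.band cw0 (Int.not cw1)) mask)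
  [("set_transitions", set_transitions), ("reset_transitions", reset_transitions),
   ("redundant_ops", 21 - set_transitions - reset_transitions), ("total_bits", 21)]

-- ===== PRECONDITION & SPEC =====
def Spec_analyze_transition (cw0 : Int) (cw1 : Int) (out : List (String × Int)) : Prop := out = analyze_transition_alt cw0 cw1
instance (cw0 : Int) (cw1 : Int) (out : List (String × Int)) : Decidable (Spec_analyze_transition cw0 cw1 out) := by unfold Spec_analyze_transition; infer_instance

-- ===== CLAIM (what is proved, stated in full; the proofs are below) =====
def Claim_equal_analyze_transition : Prop := ∀ (cw0 : Int) (cw1 : Int), Dom_analyze_transition cw0 cw1 → Spec_analyze_transition cw0 cw1 (analyze_transition cw0 cw1)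

-- ===== LEMMAS AND PROOFS =====

-- bit i of x in Python's infinite two's complement
def pbit (x : Int) (i : Nat) : Bool :=
  if 0 ≤ x then x.toNat.testBit i else !((-x - 1).toNat.testBit i)

-- m - (m &&& n) is the bitwise difference
lemma nat_sub_and (m n : Nat) : m - (m &&& n) = m.ldiff n := by
  induction m using Nat.binaryRec generalizing n with
  | zero =>
    have h : (0 : Nat).ldiff n = 0 := Nat.eq_of_testBit_eq (by simp [Nat.testBit_ldiff])
    simp [h]
  | bit b m IH =>
    induction n using Nat.bitCasesOn with | _ c n =>
    rw [Nat.land_bit, Nat.ldiff_bit, ← IH n]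
    have h1 : m &&& n ≤ m := Nat.and_le_left
    cases b <;> cases c <;> simp [Nat.bit_val] <;> omega

lemma band_pbit (a b : Int) (i : Nat) :
    pbit (PySem.Int.band a b) i = (pbit a i && pbit b i) := by
  by_cases ha : 0 ≤ a <;> by_cases hb : 0 ≤ b
  · have h : PySem.Int.band a b = ((a.toNat &&& b.toNat : Nat) : Int) := by
      unfold PySem.Int.band
      rw [if_pos ha, if_pos hb]
    simp [h, pbit, ha, hb, Nat.testBit_and]
  · have h : PySem.Int.band a b = ((a.toNat - (a.toNat &&& (-b - 1).toNat) : Nat) : Int) := by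
      unfold PySem.Int.band
      rw [if_pos ha, if_neg hb]
    simp [h, pbit, ha, hb, nat_sub_and, Nat.testBit_ldiff]
  · have h : PySem.Int.band a b = ((b.toNat - (b.toNat &&& (-a - 1).toNat) : Nat) : Int) := by
      unfold PySem.Int.band
      rw [if_neg ha, if_pos hb]
    simp [h, pbit, ha, hb, nat_sub_and, Nat.testBit_ldiff, Bool.and_comm]
  · have h : PySem.Int.band a b = -(((-a - 1).toNat ||| (-b - 1).toNat : Nat) : Int) - 1 := by
      simp [PySem.Int.band, ha, hb]
    have hneg : ¬ (0 : Int) ≤ -(((-a - 1).toNat ||| (-b - 1).toNat : Nat) : Int) - 1 := by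
      have : (0 : Int) ≤ (((-a - 1).toNat ||| (-b - 1).toNat : Nat) : Int) := Int.natCast_nonneg _
      omega
    have harg : (-(-(((-a - 1).toNat ||| (-b - 1).toNat : Nat) : Int) - 1) - 1) = (((-a - 1).toNat ||| (-b - 1).toNat : Nat) : Int) := by ring
    rw [h]
    simp only [pbit]
    rw [if_neg hneg, if_neg ha, if_neg hb, harg, Int.toNat_natCast, Nat.testBit_or]
    simp

lemma int_not_eq (x : Int) : Int.not x = -x - 1 := by
  cases x with
  | ofNat n =>
    show Int.negSucc n = -(Int.ofNat n) - 1
    rw [Int.negSucc_eq, Int.ofNat_eq_natCast]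
    ring
  | negSucc n =>
    show Int.ofNat n = -(Int.negSucc n) - 1
    rw [Int.negSucc_eq, Int.ofNat_eq_natCast]
    ring

lemma not_pbit (x : Int) (i : Nat) : pbit (Int.not x) i = !(pbit x i) := by
  rw [int_not_eq]
  by_cases hx : 0 ≤ x
  · have hneg : ¬ (0 : Int) ≤ -x - 1 := by omega
    have harg : -(-x - 1) - 1 = x := by ring
    simp only [pbit]
    rw [if_neg hneg, if_pos hx, harg]
  · have hpos : (0 : Int) ≤ -x - 1 := by omega
    simp only [pbit]
    rw [if_pos hpos, if_neg hx, Bool.not_not]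

lemma one_shiftLeft_nat (n : Nat) : ((1 : Int) <<< n) = ((2 ^ n : Nat) : Int) := by
  have h := Int.natCast_shiftLeft 1 n
  rw [Nat.one_shiftLeft] at h
  exact_mod_cast h.symm

-- A's per-bit extraction equals the two's-complement bit
lemma bitv (x : Int) (n : Nat) :
    (PySem.Int.band x (((1 <<< n : Nat) : Int))) >>> n = ((pbit x n).toNat : Int) := by
  rw [show ((1 <<< n : Nat) : Int) = ((2 ^ n : Nat) : Int) by rw [Nat.one_shiftLeft]]
  by_cases hx : 0 ≤ x
  · have h : PySem.Int.band x ((2 ^ n : Nat) : Int) = ((x.toNat &&& 2 ^ n : Nat) : Int) := by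
      unfold PySem.Int.band
      rw [if_pos hx, if_pos (Int.natCast_nonneg _), Int.toNat_natCast]
    rw [h, Nat.and_two_pow, ← Int.natCast_shiftRight, Nat.shiftRight_eq_div_pow,
      Nat.mul_div_cancel _ (Nat.two_pow_pos n)]
    simp [pbit, hx]
  · have h : PySem.Int.band x ((2 ^ n : Nat) : Int)
        = ((2 ^ n - (2 ^ n &&& (-x - 1).toNat) : Nat) : Int) := by
      unfold PySem.Int.band
      rw [if_neg hx, if_pos (Int.natCast_nonneg _), Int.toNat_natCast]
    rw [h, Nat.two_pow_and, ← Int.natCast_shiftRight, Nat.shiftRight_eq_div_pow]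
    simp only [pbit, hx, if_false]
    cases htb : (-x - 1).toNat.testBit n
    · simp [Nat.div_self (Nat.two_pow_pos n)]
    · simp

def sInd (a b : Int) (n : Nat) : Int := if !(pbit a n) && pbit b n then 1 else 0
def rInd (a b : Int) (n : Nat) : Int := if pbit a n && !(pbit b n) then 1 else 0
def dInd (a b : Int) (n : Nat) : Int := if pbit a n = pbit b n then 1 else 0

lemma step_eq (a b : Int) (st : Int × Int × Int) (n : Nat) :
    pvStep a b st (n : Int) = (st.1 + sInd a b n, st.2.1 + rInd a b n, st.2.2 + dInd a b n) := by
  show pvStep a b st (n : Int) = _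
  simp only [pvStep, Int.toNat_natCast]
  simp only [bitv]
  cases h0 : pbit a n <;> cases h1 : pbit b n <;>
    simp [sInd, rInd, dInd, h0, h1]

lemma loop_eq (a b : Int) (n : Nat) :
    (PySem.List.pyRange 0 (n : Int) 1).foldl (pvStep a b) (0, 0, 0)
      = (∑ i ∈ Finset.range n, sInd a b i,
         ∑ i ∈ Finset.range n, rInd a b i,
         ∑ i ∈ Finset.range n, dInd a b i) := by
  induction n with
  | zero =>
    have h0 : PySem.List.pyRange 0 ((0 : Nat) : Int) 1 = [] :=
      List.length_eq_zero_iff.mp (by rw [PySem.List.length_pyRange_one]; simp)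
    rw [h0]
    simp
  | succ n IH =>
    have hsplit : PySem.List.pyRange 0 ((n + 1 : Nat) : Int) 1
        = PySem.List.pyRange 0 (n : Int) 1 ++ [(n : Int)] := by
      rw [PySem.List.pyRange_one_append 0 (n : Int) ((n + 1 : Nat) : Int) (by positivity) (by push_cast; omega)]
      congr 1
      rw [PySem.List.pyRange_one_cons (by push_cast; omega)]
      have hempty : PySem.List.pyRange ((n : Int) + 1) ((n + 1 : Nat) : Int) 1 = [] :=
        List.length_eq_zero_iff.mp (by rw [PySem.List.length_pyRange_one]; push_cast; omega)
      rw [hempty]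
    rw [hsplit, List.foldl_append, IH]
    simp only [List.foldl_cons, List.foldl_nil, step_eq]
    simp [Finset.sum_range_succ]

lemma tb0 (m : Nat) : ((m.testBit 0).toNat : Int) = ((m % 2 : Nat) : Int) := by
  rw [Nat.testBit_zero]
  rcases Nat.mod_two_eq_zero_or_one m with h | h <;> simp [h]

lemma bitCount_eq (k : Nat) : ∀ m : Nat, m < 2 ^ k →
    ((PySem.Int.bitCount (m : Int) : Int)) = ∑ i ∈ Finset.range k, ((m.testBit i).toNat : Int) := by
  induction k with
  | zero =>
    intro m hm
    interval_cases m
    simp [PySem.Int.bitCount_zero]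
  | succ k IH =>
    intro m hm
    rcases Nat.eq_zero_or_pos m with h0 | h0
    · subst h0
      simp [PySem.Int.bitCount_zero, Nat.zero_testBit]
    · have hdiv : m / 2 < 2 ^ k := by
        have : 2 ^ (k + 1) = 2 * 2 ^ k := by ring
        omega
      have hIH := IH (m / 2) hdiv
      have hstep : ∀ i, ((m.testBit (i + 1)).toNat : Int) = (((m / 2).testBit i).toNat : Int) := by
        intro i
        rw [Nat.testBit_succ]
      rw [PySem.Int.bitCount_natCast h0, Finset.sum_range_succ']
      simp only [hstep, tb0]
      push_cast
      rw [show ((m : Int) / 2) = ((m / 2 : Nat) : Int) by push_cast; ring, hIH]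
      ring

-- `x & ((1 << 21) - 1)` is `x mod 2^21`
lemma band_mask (x : Int) :
    PySem.Int.band x ((1 : Int) <<< (21 : Nat) - 1) = x % (2 ^ 21 : Int) := by
  have hmask : ((1 : Int) <<< (21 : Nat) - 1) = ((2 ^ 21 - 1 : Nat) : Int) := by
    rw [one_shiftLeft_nat, Nat.cast_sub (by norm_num : (1 : Nat) ≤ 2 ^ 21)]
    norm_num
  rw [hmask]
  by_cases hx : 0 ≤ x
  · have h : PySem.Int.band x ((2 ^ 21 - 1 : Nat) : Int) = ((x.toNat &&& (2 ^ 21 - 1) : Nat) : Int) := by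
      unfold PySem.Int.band
      rw [if_pos hx, if_pos (Int.natCast_nonneg _), Int.toNat_natCast]
    rw [h, Nat.and_two_pow_sub_one_eq_mod]
    omega
  · have h : PySem.Int.band x ((2 ^ 21 - 1 : Nat) : Int)
        = (((2 ^ 21 - 1) - ((2 ^ 21 - 1) &&& (-x - 1).toNat) : Nat) : Int) := by
      unfold PySem.Int.band
      rw [if_neg hx, if_pos (Int.natCast_nonneg _), Int.toNat_natCast]
    rw [h, Nat.land_comm, Nat.and_two_pow_sub_one_eq_mod]
    omega

lemma mod_testBit (w : Int) (i : Nat) (hi : i < 21) :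
    (w % (2 ^ 21 : Int)).toNat.testBit i = pbit w i := by
  by_cases hw : 0 ≤ w
  · have h : (w % (2 ^ 21 : Int)).toNat = w.toNat % 2 ^ 21 := by omega
    rw [h, Nat.testBit_mod_two_pow]
    simp [pbit, hw, hi]
  · have hm0 : (-w - 1).toNat % 2 ^ 21 < 2 ^ 21 := Nat.mod_lt _ (by norm_num)
    have h : (w % (2 ^ 21 : Int)).toNat = 2 ^ 21 - ((-w - 1).toNat % 2 ^ 21 + 1) := by omega
    rw [h, Nat.testBit_two_pow_sub_succ hm0, Nat.testBit_mod_two_pow]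
    simp [pbit, hw, hi]

-- the masked popcount equals the corresponding per-bit sum
lemma popcount_sum (w : Int) (f : Nat → Bool) (hf : ∀ i, i < 21 → pbit w i = f i) :
    ((PySem.Int.bitCount (PySem.Int.band w ((1 : Int) <<< (21 : Nat) - 1)) : Int))
      = ∑ i ∈ Finset.range 21, ((f i).toNat : Int) := by
  rw [band_mask]
  have hnn : 0 ≤ w % (2 ^ 21 : Int) := by omega
  have hlt : (w % (2 ^ 21 : Int)).toNat < 2 ^ 21 := by omega
  have hcast : (w % (2 ^ 21 : Int)) = (((w % (2 ^ 21 : Int)).toNat : Nat) : Int) := by omega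
  rw [hcast, bitCount_eq 21 _ hlt]
  refine Finset.sum_congr rfl ?_
  intro i hi
  rw [Finset.mem_range] at hi
  rw [mod_testBit w i hi, hf i hi]

lemma ind_total (a b : Int) (n : Nat) : sInd a b n + rInd a b n + dInd a b n = 1 := by
  unfold sInd rInd dInd
  cases h0 : pbit a n <;> cases h1 : pbit b n <;> simp

lemma ite_bool_toNat (c : Bool) : (if c then (1 : Int) else 0) = (c.toNat : Int) := by
  cases c <;> simp

-- ===== VERDICT (by name: the statement is the Claim_ definition above) =====
theorem analyze_transition_spec : Claim_equal_analyze_transition := by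
  intro cw0 cw1 _
  show analyze_transition cw0 cw1 = analyze_transition_alt cw0 cw1
  unfold analyze_transition analyze_transition_alt
  have h21 : ((21 : Int)) = ((21 : Nat) : Int) := by norm_num
  rw [h21, loop_eq]
  have hs : ((PySem.Int.bitCount (PySem.Int.band (PySem.Int.band (Int.not cw0) cw1) ((1 : Int) <<< (21 : Nat) - 1)) : Int))
      = ∑ i ∈ Finset.range 21, sInd cw0 cw1 i := by
    rw [popcount_sum (PySem.Int.band (Int.not cw0) cw1) (fun i => !(pbit cw0 i) && pbit cw1 i)
      (fun i _ => by rw [band_pbit, not_pbit])]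
    refine Finset.sum_congr rfl (fun i _ => ?_)
    rw [sInd, ite_bool_toNat]
  have hr : ((PySem.Int.bitCount (PySem.Int.band (PySem.Int.band cw0 (Int.not cw1)) ((1 : Int) <<< (21 : Nat) - 1)) : Int))
      = ∑ i ∈ Finset.range 21, rInd cw0 cw1 i := by
    rw [popcount_sum (PySem.Int.band cw0 (Int.not cw1)) (fun i => pbit cw0 i && !(pbit cw1 i))
      (fun i _ => by rw [band_pbit, not_pbit])]
    refine Finset.sum_congr rfl (fun i _ => ?_)
    rw [rInd, ite_bool_toNat]
  have htot : ∑ i ∈ Finset.range 21, dInd cw0 cw1 i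
      = 21 - (∑ i ∈ Finset.range 21, sInd cw0 cw1 i) - (∑ i ∈ Finset.range 21, rInd cw0 cw1 i) := by
    have h : ∑ i ∈ Finset.range 21, (sInd cw0 cw1 i + rInd cw0 cw1 i + dInd cw0 cw1 i) = 21 := by
      simp [ind_total]
    rw [Finset.sum_add_distrib, Finset.sum_add_distrib] at h
    linarith
  simp only [hs, hr, htot]
  norm_num
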